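-- pv_equiv track=rewrite | github.com/wwshenmegui/alzheimer_detection | src/shared/data_quality.py | assign_duplicate_groups
-- ===== SOURCE A (Python) =====
-- from typing import Any
--
-- DEFAULT_DUPLICATE_HASH_DISTANCE = 6
--
-- def hamming_distance(left: str, right: str) -> int:
--     if len(left) != len(right):
--         raise ValueError("Hash strings must have equal length.")
--     return sum(char_left != char_right for char_left, char_right in zip(left, right))
--
-- def assign_duplicate_groups(records: list[dict[str, Any]], max_hash_distance: int = DEFAULT_DUPLICATE_HASH_DISTANCE) -> list[dict[str, Any]]:
--     sha_groups: dict[str, list[int]] = {}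
--     for index, record in enumerate(records):
--         sha_groups.setdefault(str(record.get("sha256", "")), []).append(index)
--
--     for group_number, indices in enumerate((group for group in sha_groups.values() if len(group) > 1), start=1):
--         for index in indices:
--             records[index]["duplicate_group_id"] = f"exact_duplicate_{group_number:05d}"
--
--     near_group_number = 1
--     for index, record in enumerate(records):
--         if record.get("duplicate_group_id"):
--             continue
--         for other_index in range(index + 1, len(records)):
--             other = records[other_index]
--             if other.get("duplicate_group_id"):
--                 continue
--             if record.get("label_name") != other.get("label_name"):
--                 continue
--             distance = hamming_distance(str(record.get("average_hash", "")), str(other.get("average_hash", "")))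
--             if distance <= max_hash_distance:
--                 group_id = f"near_duplicate_{near_group_number:05d}"
--                 records[index]["duplicate_group_id"] = group_id
--                 other["duplicate_group_id"] = group_id
--         if record.get("duplicate_group_id", "").startswith("near_duplicate_"):
--             near_group_number += 1
--
--     for record in records:
--         record["duplicate_group_id"] = record.get("duplicate_group_id") or ""
--         record["group_id"] = record.get("patient_id") or record["duplicate_group_id"] or str(record["sample_id"])
--     return records
-- ===== SOURCE B (Python) =====
-- def _hash_mismatches(left, right):
--     if len(left) != len(right):
--         raise ValueError("Hash strings must have equal length.")
--     diff = 0
--     for a, b in zip(left, right):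
--         if a != b:
--             diff += 1
--     return diff
--
--
-- def assign_duplicate_groups(records, max_hash_distance=6):
--     n = len(records)
--     # one counting pass over sha256 values
--     counts = {}
--     for record in records:
--         sha = str(record.get("sha256", ""))
--         counts[sha] = counts.get(sha, 0) + 1
--     # current group-id state, kept in a plain array instead of mutating dicts
--     gids = [record.get("duplicate_group_id") for record in records]
--     # exact ids: number duplicated shas by first occurrence
--     rank = {}
--     for i in range(n):
--         sha = str(records[i].get("sha256", ""))
--         if counts[sha] > 1:
--             if sha not in rank:
--                 rank[sha] = len(rank) + 1
--             gids[i] = "exact_duplicate_%05d" % rank[sha]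
--     # bucket indices by label so near-duplicate scans stay inside one label
--     buckets = {}
--     for i in range(n):
--         buckets.setdefault(records[i].get("label_name"), []).append(i)
--     near = 1
--     for i in range(n):
--         if gids[i]:
--             continue
--         left_hash = str(records[i].get("average_hash", ""))
--         gid = "near_duplicate_%05d" % near
--         hit = False
--         for j in buckets[records[i].get("label_name")]:
--             if j > i and not gids[j] and _hash_mismatches(left_hash, str(records[j].get("average_hash", ""))) <= max_hash_distance:
--                 gids[j] = gid
--                 hit = True
--         if hit:
--             gids[i] = gid
--             near += 1
--     # build fresh result records (the input list is left unmodified)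
--     out = []
--     for record, gid in zip(records, gids):
--         dup = gid if gid else ""
--         new_record = dict(record)
--         new_record["duplicate_group_id"] = dup
--         new_record["group_id"] = record.get("patient_id") or dup or str(record["sample_id"])
--         out.append(new_record)
--     return out
-- ===== Notes on version B (the rewrite author's own statement) =====
-- stated objective: alternative
-- what changed: B replaces A's dict-of-index-lists grouping and repeated in-place record mutation by one sha256-counting pass with first-occurrence ranking for exact ids, label buckets so the near-duplicate scan only visits same-label indices, and a flat group-id array with batch anchor assignment, building fresh result records.
import Mathlib
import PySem

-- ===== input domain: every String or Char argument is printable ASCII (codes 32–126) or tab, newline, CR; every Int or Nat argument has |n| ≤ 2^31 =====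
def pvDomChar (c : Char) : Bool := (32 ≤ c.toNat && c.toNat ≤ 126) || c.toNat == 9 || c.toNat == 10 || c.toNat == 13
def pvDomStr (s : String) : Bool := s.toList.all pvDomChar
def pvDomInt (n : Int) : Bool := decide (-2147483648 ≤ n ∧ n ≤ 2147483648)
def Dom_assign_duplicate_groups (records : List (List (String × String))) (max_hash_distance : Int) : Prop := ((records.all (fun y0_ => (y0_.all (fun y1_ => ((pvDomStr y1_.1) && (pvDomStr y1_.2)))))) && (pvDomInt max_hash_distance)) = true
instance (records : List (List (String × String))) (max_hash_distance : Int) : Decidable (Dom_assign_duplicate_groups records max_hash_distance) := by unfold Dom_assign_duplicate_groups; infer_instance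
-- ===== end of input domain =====

-- B re-implements the grouping with one sha-counting pass, label buckets for the near-duplicate
-- scan and a flat group-id array instead of repeated dict mutation (objective: alternative
-- structure, same result). A mutates the input records in place; B builds fresh records, so the
-- equivalence proved here is about the RETURN value only.

-- == shared small helpers (both Pythons format "%05d" and count hash mismatches the same way) ==
def pvPad5 (n : Int) : String := PySem.Str.zfill (PySem.Int.toStr n) 5
def pvTruthy (o : Option String) : Bool := o.getD "" != ""
-- mismatch count over zip; the Python ValueError branch (unequal lengths) is excluded by Pre_
def pvHamming (l r : String) : Int :=
  ((l.toList.zip r.toList).map (fun p => if p.1 ≠ p.2 then (1 : Int) else 0)).sum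

-- ===== PORT A =====
-- records[i][k] = v
def pvSetKey (recs : List (PySem.Dict String String)) (i : Int) (k v : String) :
    List (PySem.Dict String String) :=
  PySem.List.pySetD recs i ((PySem.List.pyGetD recs i PySem.Dict.empty).insert k v)

-- loop body of A's near-duplicate inner scan (other_index = j)
def pvAInner (max_hash_distance : Int) (i : Int)
    (ng : Int) (recs : List (PySem.Dict String String)) (j : Int) :
    List (PySem.Dict String String) :=
  let record := PySem.List.pyGetD recs i PySem.Dict.empty
  let other := PySem.List.pyGetD recs j PySem.Dict.empty
  if pvTruthy (other.get? "duplicate_group_id") then recs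
  else if record.get? "label_name" ≠ other.get? "label_name" then recs
  else if pvHamming (record.getD "average_hash" "") (other.getD "average_hash" "") ≤ max_hash_distance then
    let group_id := "near_duplicate_" ++ pvPad5 ng
    pvSetKey (pvSetKey recs i "duplicate_group_id" group_id) j "duplicate_group_id" group_id
  else recs

-- loop body of A's near-duplicate outer loop (index = i)
def pvAStep (max_hash_distance : Int) (n : Int)
    (st : List (PySem.Dict String String) × Int) (i : Int) :
    List (PySem.Dict String String) × Int :=
  let record := PySem.List.pyGetD st.1 i PySem.Dict.empty
  if pvTruthy (record.get? "duplicate_group_id") then st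
  else
    let recs' := (PySem.List.pyRange (i + 1) n 1).foldl (pvAInner max_hash_distance i st.2) st.1
    if PySem.Str.startswith ((PySem.List.pyGetD recs' i PySem.Dict.empty).getD "duplicate_group_id" "") "near_duplicate_"
    then (recs', st.2 + 1) else (recs', st.2)

def assign_duplicate_groups (records : List (List (String × String))) (max_hash_distance : Int) :
    List (List (String × String)) :=
  let recs0 : List (PySem.Dict String String) := records.map PySem.Dict.ofList
  let n : Int := (recs0.length : Int)
  let sha_groups : PySem.Dict String (List Int) :=
    (PySem.List.enumerate recs0 0).foldl
      (fun d p => d.modify (p.2.getD "sha256" "") [] (fun g => g ++ [p.1])) PySem.Dict.empty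
  let recs1 : List (PySem.Dict String String) :=
    (PySem.List.enumerate (sha_groups.values.filter (fun g => 1 < g.length)) 1).foldl
      (fun recs p => p.2.foldl
        (fun recs idx => pvSetKey recs idx "duplicate_group_id" ("exact_duplicate_" ++ pvPad5 p.1)) recs)
      recs0
  let st2 := (PySem.List.pyRange 0 n 1).foldl (pvAStep max_hash_distance n) (recs1, 1)
  st2.1.map (fun r =>
    let dup := r.getD "duplicate_group_id" ""
    let r := r.insert "duplicate_group_id" dup
    -- record["sample_id"] raises KeyError when absent and needed; excluded by Pre_, getD is exact there
    let gid := if pvTruthy (r.get? "patient_id") then (r.get? "patient_id").getD ""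
               else if dup ≠ "" then dup else r.getD "sample_id" ""
    (r.insert "group_id" gid).items)

-- ===== PORT B =====
-- loop body of B's bucket scan: assign j, remember that the anchor matched
def pvBInner (recs0 : List (PySem.Dict String String)) (max_hash_distance : Int) (i : Int)
    (left_hash : String) (gid : String) (p : List (Option String) × Bool) (j : Int) :
    List (Option String) × Bool :=
  if i < j ∧ pvTruthy (PySem.List.pyGetD p.1 j none) = false ∧
      pvHamming left_hash ((PySem.List.pyGetD recs0 j PySem.Dict.empty).getD "average_hash" "") ≤ max_hash_distance
  then (PySem.List.pySetD p.1 j (some gid), true) else p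

-- loop body of B's near-duplicate outer loop
def pvBStep (recs0 : List (PySem.Dict String String)) (max_hash_distance : Int)
    (buckets : PySem.Dict (Option String) (List Int))
    (st : List (Option String) × Int) (i : Int) : List (Option String) × Int :=
  if pvTruthy (PySem.List.pyGetD st.1 i none) then st
  else
    let left_hash := (PySem.List.pyGetD recs0 i PySem.Dict.empty).getD "average_hash" ""
    let gid := "near_duplicate_" ++ pvPad5 st.2
    let scan := (buckets.getD ((PySem.List.pyGetD recs0 i PySem.Dict.empty).get? "label_name") []).foldl
      (pvBInner recs0 max_hash_distance i left_hash gid) (st.1, false)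
    if scan.2 then (PySem.List.pySetD scan.1 i (some gid), st.2 + 1) else (scan.1, st.2)

-- loop body of B's exact-id pass: rank duplicated shas by first occurrence
def pvBExact (recs0 : List (PySem.Dict String String)) (counts : PySem.Dict String Int)
    (st : List (Option String) × PySem.Dict String Int) (i : Int) :
    List (Option String) × PySem.Dict String Int :=
  let sha := (PySem.List.pyGetD recs0 i PySem.Dict.empty).getD "sha256" ""
  if 1 < counts.getD sha 0 then
    let rank := if st.2.contains sha then st.2 else st.2.insert sha ((st.2.size : Int) + 1)
    (PySem.List.pySetD st.1 i (some ("exact_duplicate_" ++ pvPad5 (rank.getD sha 0))), rank)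
  else st

def assign_duplicate_groups_alt (records : List (List (String × String))) (max_hash_distance : Int) :
    List (List (String × String)) :=
  let recs0 : List (PySem.Dict String String) := records.map PySem.Dict.ofList
  let n : Int := (recs0.length : Int)
  let counts : PySem.Dict String Int :=
    recs0.foldl (fun d r =>
      let sha := r.getD "sha256" ""
      d.insert sha (d.getD sha 0 + 1)) PySem.Dict.empty
  let gids0 : List (Option String) := recs0.map (fun r => r.get? "duplicate_group_id")
  let gids1 := ((PySem.List.pyRange 0 n 1).foldl (pvBExact recs0 counts) (gids0, PySem.Dict.empty)).1
  let buckets : PySem.Dict (Option String) (List Int) :=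
    (PySem.List.pyRange 0 n 1).foldl
      (fun d i => d.modify ((PySem.List.pyGetD recs0 i PySem.Dict.empty).get? "label_name") [] (fun b => b ++ [i]))
      PySem.Dict.empty
  let st2 := (PySem.List.pyRange 0 n 1).foldl (pvBStep recs0 max_hash_distance buckets) (gids1, 1)
  (recs0.zip st2.1).map (fun p =>
    let dup := p.2.getD ""
    let r2 := p.1.insert "duplicate_group_id" dup
    -- record["sample_id"]: KeyError excluded by Pre_, getD is exact there
    let gid := if pvTruthy (p.1.get? "patient_id") then (p.1.get? "patient_id").getD ""
               else if dup ≠ "" then dup else p.1.getD "sample_id" ""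
    (r2.insert "group_id" gid).items)

-- ===== PRECONDITION & SPEC =====
def pvPreGet (r : List (String × String)) (k : String) : Option String :=
  (PySem.Dict.ofList r).get? k
-- a record never compared for near-duplicates because its sha256 is duplicated
-- or it already carries a truthy duplicate_group_id
def pvShield (records : List (List (String × String))) (r : List (String × String)) : Bool :=
  pvTruthy (pvPreGet r "duplicate_group_id") ||
    1 < (records.map (fun q => (pvPreGet q "sha256").getD "")).count ((pvPreGet r "sha256").getD "")

-- Pre_ excludes the inputs where A raises: a ValueError when two same-label unshielded records
-- carry average_hash strings of different lengths, and a KeyError when a record without a truthy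
-- patient_id and without a final duplicate_group_id lacks the "sample_id" key. The first clause is
-- slightly conservative: a record can also be saved from the KeyError by a near-duplicate id
-- assigned at run time (see the cite in claim.json) — A returns there and B returns the same value.
def Pre_assign_duplicate_groups (records : List (List (String × String))) (max_hash_distance : Int) : Prop :=
  (∀ r ∈ records, pvTruthy (pvPreGet r "patient_id") = true ∨
      (PySem.Dict.ofList r).contains "sample_id" = true ∨ pvShield records r = true) ∧
  records.Pairwise (fun r s =>
    pvPreGet r "label_name" = pvPreGet s "label_name" →
    pvShield records r = false → pvShield records s = false →
    ((pvPreGet r "average_hash").getD "").toList.length = ((pvPreGet s "average_hash").getD "").toList.length)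

instance (records : List (List (String × String))) (max_hash_distance : Int) :
    Decidable (Pre_assign_duplicate_groups records max_hash_distance) := by
  unfold Pre_assign_duplicate_groups; infer_instance

def pvWitness_assign_duplicate_groups : (List (List (String × String))) × Int :=
  ([[("sample_id", "1"), ("average_hash", "0011")], [("sample_id", "2"), ("average_hash", "0111")]], 6)

def Spec_assign_duplicate_groups (records : List (List (String × String))) (max_hash_distance : Int) (out : List (List (String × String))) : Prop := out = assign_duplicate_groups_alt records max_hash_distance
instance (records : List (List (String × String))) (max_hash_distance : Int) (out : List (List (String × String))) : Decidable (Spec_assign_duplicate_groups records max_hash_distance out) := by unfold Spec_assign_duplicate_groups; infer_instance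

-- ===== CLAIM (what is proved, stated in full; the proofs are below) =====
def Claim_equal_assign_duplicate_groups : Prop := ∀ (records : List (List (String × String))) (max_hash_distance : Int), Dom_assign_duplicate_groups records max_hash_distance → Pre_assign_duplicate_groups records max_hash_distance → Spec_assign_duplicate_groups records max_hash_distance (assign_duplicate_groups records max_hash_distance)

-- ===== LEMMAS AND PROOFS =====

-- == proof-side abbreviations ==
def pvSha (r : PySem.Dict String String) : String := r.getD "sha256" ""
def pvLab (r : PySem.Dict String String) : Option String := r.get? "label_name"
def pvG0 (r : PySem.Dict String String) : Option String := r.get? "duplicate_group_id"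
def pvRk (R : List (PySem.Dict String String)) (k : Nat) : PySem.Dict String String :=
  R.getD k PySem.Dict.empty
def pvShas (R : List (PySem.Dict String String)) : List String := R.map pvSha
def pvDup (R : List (PySem.Dict String String)) : List String :=
  (PySem.Set.ofList (pvShas R)).filter (fun s => 1 < (pvShas R).count s)
def pvExGid (R : List (PySem.Dict String String)) (s : String) : String :=
  "exact_duplicate_" ++ pvPad5 ((List.idxOf s (pvDup R) : Int) + 1)
def pvEg (R : List (PySem.Dict String String)) (k : Nat) : Option String :=
  if 1 < (pvShas R).count (pvSha (pvRk R k)) then some (pvExGid R (pvSha (pvRk R k)))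
  else pvG0 (pvRk R k)
-- the simulation relation between A's mutated record list and B's group-id array
def pvRel (R recs : List (PySem.Dict String String)) (gids : List (Option String)) : Prop :=
  recs.length = R.length ∧ gids.length = R.length ∧
  ∀ k, k < R.length →
    (recs.getD k PySem.Dict.empty = pvRk R k ∧ gids.getD k none = pvG0 (pvRk R k)) ∨
    (∃ g, recs.getD k PySem.Dict.empty = (pvRk R k).insert "duplicate_group_id" g ∧
      gids.getD k none = some g)

-- == generic small lemmas ==
lemma pvRangeGetD {α : Type} (f : Nat → α) (n k : Nat) (d : α) :
    ((List.range n).map f).getD k d = if k < n then f k else d := by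
  by_cases h : k < n
  · rw [List.getD_eq_getElem _ _ (by simpa using h)]
    simp [h]
  · rw [List.getD_eq_default _ _ (by simpa using Nat.le_of_not_lt h)]
    simp [h]

lemma pvMapGetD {α β : Type} (R : List α) (f : α → β) (d : α) :
    R.map f = (List.range R.length).map (fun k => f (R.getD k d)) := by
  refine List.ext_getElem (by simp) ?_
  intro k h1 h2
  simp only [List.getElem_map, List.getElem_range]
  rw [List.getD_eq_getElem _ _ (by simpa using h2)]

lemma pvEnumEq {α : Type} (R : List α) (d : α) : ∀ a : Int,
    PySem.List.enumerate R a = (List.range R.length).map (fun (k : Nat) => (a + (k : Int), R.getD k d)) := by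
  induction R with
  | nil => intro a; simp [PySem.List.enumerate_nil]
  | cons x xs ih =>
    intro a
    rw [PySem.List.enumerate_cons, ih (a + 1)]
    simp only [List.length_cons, List.range_succ_eq_map, List.map_cons, List.map_map]
    refine congrArg₂ List.cons (by simp) ?_
    refine List.map_congr_left ?_
    intro k _
    simp only [Function.comp_apply, List.getD_cons_succ]
    refine congrArg₂ Prod.mk ?_ rfl
    push_cast; ring

lemma pvSetKeyLen (recs : List (PySem.Dict String String)) (i : Int) (k v : String) :
    (pvSetKey recs i k v).length = recs.length := by
  simp [pvSetKey, PySem.List.length_pySetD]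

lemma pvSetKeyGetD (recs : List (PySem.Dict String String)) (j : Nat) (k v : String)
    (hj : j < recs.length) (t : Nat) :
    (pvSetKey recs (j : Int) k v).getD t PySem.Dict.empty =
      if t = j then (recs.getD j PySem.Dict.empty).insert k v
      else recs.getD t PySem.Dict.empty := by
  unfold pvSetKey
  rw [PySem.List.pySetD_natCast, PySem.List.pyGetD_natCast]
  by_cases h : t = j
  · subst h
    rw [List.getD_eq_getElem _ _ (by simpa [List.length_set] using hj), if_pos rfl]
    simp
  · rw [if_neg h]
    by_cases ht : t < recs.length
    · rw [List.getD_eq_getElem _ _ (by simpa [List.length_set] using ht)]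
      simp only [List.getElem_set]
      rw [if_neg (fun hh => h (Eq.symm hh))]
      exact (List.getD_eq_getElem _ _ (by simpa using ht)).symm
    · have ht' := Nat.le_of_not_lt ht
      rw [List.getD_eq_default _ _ (by simpa [List.length_set] using ht'),
          List.getD_eq_default _ _ (by simpa using ht')]

lemma pvFoldSet (v : String) : ∀ (J : List Int) (recs : List (PySem.Dict String String)),
    J.Nodup → (∀ j ∈ J, 0 ≤ j ∧ j < (recs.length : Int)) →
    ((J.foldl (fun recs idx => pvSetKey recs idx "duplicate_group_id" v) recs).length = recs.length ∧
     ∀ t, t < recs.length →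
       (J.foldl (fun recs idx => pvSetKey recs idx "duplicate_group_id" v) recs).getD t PySem.Dict.empty =
       if (t : Int) ∈ J then (recs.getD t PySem.Dict.empty).insert "duplicate_group_id" v
       else recs.getD t PySem.Dict.empty) := by
  intro J
  induction J with
  | nil => intro recs _ _; simp
  | cons j J' ih =>
    intro recs hnd hb
    have hj0 : 0 ≤ j := (hb j (by simp)).1
    have hjlt : j.toNat < recs.length := by
      have := (hb j (by simp)).2; omega
    have hcast : (j.toNat : Int) = j := Int.toNat_of_nonneg hj0
    have hlen1 : (pvSetKey recs j "duplicate_group_id" v).length = recs.length := pvSetKeyLen ..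
    have ih' := ih (pvSetKey recs j "duplicate_group_id" v) hnd.of_cons
      (by intro x hx; rw [hlen1]; exact hb x (by simp [hx]))
    refine ⟨by simpa [hlen1] using ih'.1, ?_⟩
    intro t ht
    have hstep : ∀ t', (pvSetKey recs (j : Int) "duplicate_group_id" v).getD t' PySem.Dict.empty =
        if t' = j.toNat then (recs.getD j.toNat PySem.Dict.empty).insert "duplicate_group_id" v
        else recs.getD t' PySem.Dict.empty := by
      intro t'; rw [← hcast]; exact pvSetKeyGetD recs j.toNat _ v hjlt t'
    simp only [List.foldl_cons]
    rw [ih'.2 t (by omega), hstep t]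
    by_cases h1 : (t : Int) ∈ J'
    · have hne : t ≠ j.toNat := by
        intro h; apply (List.nodup_cons.mp hnd).1; rw [← hcast, ← h]; exact h1
      simp [h1, hne, List.mem_cons]
    · by_cases h2 : t = j.toNat
      · subst h2
        have hj' : j ∉ J' := by rwa [hcast] at h1
        simp [h1, hcast, hj']
      · have : ((t : Int) = j) = False := by
          simp only [eq_iff_iff, iff_false]; intro h; apply h2; omega
        simp [h1, h2, List.mem_cons, this]

def pvIdxs (R : List (PySem.Dict String String)) (s : String) : List Int :=
  ((List.range R.length).filter (fun k => pvSha (pvRk R k) == s)).map (fun k => Int.ofNat k)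

lemma pvMemIdxs (R : List (PySem.Dict String String)) (s : String) (t : Nat) :
    ((t : Int) ∈ pvIdxs R s) ↔ (t < R.length ∧ pvSha (pvRk R t) = s) := by
  simp only [pvIdxs, List.mem_map, List.mem_filter, List.mem_range, beq_iff_eq]
  constructor
  · rintro ⟨k, ⟨hk1, hk2⟩, hkt⟩
    have : k = t := by simpa using hkt
    subst this; exact ⟨hk1, hk2⟩
  · rintro ⟨h1, h2⟩; exact ⟨t, ⟨h1, h2⟩, rfl⟩

lemma pvIdxsNodup (R : List (PySem.Dict String String)) (s : String) : (pvIdxs R s).Nodup := by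
  unfold pvIdxs
  refine List.Nodup.map ?_ (List.Nodup.filter _ List.nodup_range)
  intro a b h; simpa using h

lemma pvIdxsBound (R : List (PySem.Dict String String)) (s : String) :
    ∀ j ∈ pvIdxs R s, 0 ≤ j ∧ j < (R.length : Int) := by
  intro j hj
  simp only [pvIdxs, List.mem_map, List.mem_filter, List.mem_range] at hj
  obtain ⟨k, ⟨hk1, _⟩, hkj⟩ := hj
  subst hkj
  simp only [Int.ofNat_eq_natCast]
  omega

lemma pvEnumMap {α β : Type} (l : List α) (f : α → β) : ∀ a : Int,
    PySem.List.enumerate (l.map f) a = (PySem.List.enumerate l a).map (fun p => (p.1, f p.2)) := by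
  induction l with
  | nil => intro a; simp [PySem.List.enumerate_nil]
  | cons x xs ih =>
    intro a
    simp [PySem.List.enumerate_cons, ih (a + 1)]

lemma pvA2 (R : List (PySem.Dict String String)) : ∀ (L : List String) (start : Int)
    (recs : List (PySem.Dict String String)), recs.length = R.length → L.Nodup →
    (((PySem.List.enumerate L start).foldl (fun recs p => (pvIdxs R p.2).foldl
        (fun recs idx => pvSetKey recs idx "duplicate_group_id" ("exact_duplicate_" ++ pvPad5 p.1)) recs)
        recs).length = R.length ∧
     ∀ t, t < R.length →
       ((PySem.List.enumerate L start).foldl (fun recs p => (pvIdxs R p.2).foldl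
          (fun recs idx => pvSetKey recs idx "duplicate_group_id" ("exact_duplicate_" ++ pvPad5 p.1)) recs)
          recs).getD t PySem.Dict.empty =
       if pvSha (pvRk R t) ∈ L then
         (recs.getD t PySem.Dict.empty).insert "duplicate_group_id"
           ("exact_duplicate_" ++ pvPad5 (start + (L.idxOf (pvSha (pvRk R t)) : Int)))
       else recs.getD t PySem.Dict.empty) := by
  intro L
  induction L with
  | nil => intro start recs hlen _; simpa [PySem.List.enumerate_nil] using hlen
  | cons s L' ih =>
    intro start recs hlen hnd
    rw [PySem.List.enumerate_cons]
    simp only [List.foldl_cons]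
    set recs1 := (pvIdxs R s).foldl
      (fun recs idx => pvSetKey recs idx "duplicate_group_id" ("exact_duplicate_" ++ pvPad5 start)) recs with hrecs1
    have hfs := pvFoldSet ("exact_duplicate_" ++ pvPad5 start) (pvIdxs R s) recs
      (pvIdxsNodup R s) (by rw [hlen]; exact pvIdxsBound R s)
    have hlen1 : recs1.length = R.length := by rw [hrecs1, hfs.1, hlen]
    have ih' := ih (start + 1) recs1 hlen1 hnd.of_cons
    refine ⟨ih'.1, ?_⟩
    intro t ht
    rw [ih'.2 t ht]
    have hgetD1 : recs1.getD t PySem.Dict.empty =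
        if (t : Int) ∈ pvIdxs R s then
          (recs.getD t PySem.Dict.empty).insert "duplicate_group_id" ("exact_duplicate_" ++ pvPad5 start)
        else recs.getD t PySem.Dict.empty := hfs.2 t (by omega)
    by_cases hs : pvSha (pvRk R t) = s
    · have hmem : (t : Int) ∈ pvIdxs R s := (pvMemIdxs R s t).mpr ⟨ht, hs⟩
      have hnot : pvSha (pvRk R t) ∉ L' := by rw [hs]; exact (List.nodup_cons.mp hnd).1
      rw [if_neg hnot] at *
      rw [hgetD1, if_pos hmem]
      simp [hs, List.idxOf_cons_self]
    · have hmem : (t : Int) ∉ pvIdxs R s := fun h => hs ((pvMemIdxs R s t).mp h).2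
      rw [hgetD1, if_neg hmem]
      by_cases hL : pvSha (pvRk R t) ∈ L'
      · rw [if_pos hL, if_pos (by simp [hL])]
        have : (s :: L').idxOf (pvSha (pvRk R t)) = L'.idxOf (pvSha (pvRk R t)) + 1 := by
          rw [List.idxOf_cons_ne _ (by exact fun h => hs h.symm)]
        rw [this]
        refine congrArg _ ?_
        refine congrArg _ (congrArg pvPad5 ?_)
        push_cast; ring
      · rw [if_neg hL, if_neg (by simp [hs, hL, List.mem_cons])]

lemma pvB1 (R : List (PySem.Dict String String)) (s : String) :
    (R.foldl (fun d r =>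
        d.insert (r.getD "sha256" "") (d.getD (r.getD "sha256" "") 0 + 1))
        (PySem.Dict.empty : PySem.Dict String Int)).getD s 0 =
      ((pvShas R).count s : Int) := by
  rw [show (R.foldl (fun d r =>
        d.insert (r.getD "sha256" "") (d.getD (r.getD "sha256" "") 0 + 1))
        (PySem.Dict.empty : PySem.Dict String Int)) =
      ((R.map pvSha).foldl (fun d x => d.insert x (d.getD x 0 + 1)) PySem.Dict.empty)
    from (List.foldl_map (f := pvSha) (g := fun (d : PySem.Dict String Int) x => d.insert x (d.getD x 0 + 1))
      (l := R) (init := PySem.Dict.empty)).symm]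
  rw [PySem.Dict.getD_foldl_insert_add_one]
  simp [pvShas]

def pvDdup (R : List (PySem.Dict String String)) (t : Nat) : List String :=
  (PySem.Set.ofList ((R.take t).map pvSha)).filter (fun s => 1 < (pvShas R).count s)

lemma pvDdupPrefix (R : List (PySem.Dict String String)) (t : Nat) :
    pvDdup R t <+: pvDup R := by
  have hsplit : pvShas R = (R.take t).map pvSha ++ (R.drop t).map pvSha := by
    rw [← List.map_append, List.take_append_drop]
    rfl
  unfold pvDdup pvDup
  rw [hsplit, PySem.Set.ofList_append, PySem.Set.update_eq_append_filter, List.filter_append]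
  exact ⟨_, rfl⟩

-- one step of the prefix-set of duplicated shas
lemma pvDdupSucc (R : List (PySem.Dict String String)) (t : Nat) (ht : t < R.length) :
    (¬ 1 < (pvShas R).count (pvSha (pvRk R t)) → pvDdup R (t + 1) = pvDdup R t) ∧
    (pvSha (pvRk R t) ∈ pvDdup R t → pvDdup R (t + 1) = pvDdup R t) ∧
    (1 < (pvShas R).count (pvSha (pvRk R t)) → pvSha (pvRk R t) ∉ pvDdup R t →
      pvDdup R (t + 1) = pvDdup R t ++ [pvSha (pvRk R t)] ∧
      (pvDup R).idxOf (pvSha (pvRk R t)) = (pvDdup R t).length) := by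
  have hRk : pvRk R t = R[t] := List.getD_eq_getElem _ _ ht
  have htake : (R.take (t + 1)).map pvSha = (R.take t).map pvSha ++ [pvSha (pvRk R t)] := by
    rw [List.take_add_one, List.getElem?_eq_getElem ht, List.map_append]
    simp [hRk]
  have hset : PySem.Set.ofList ((R.take (t + 1)).map pvSha) =
      PySem.Set.add (PySem.Set.ofList ((R.take t).map pvSha)) (pvSha (pvRk R t)) := by
    rw [htake, PySem.Set.ofList_append_singleton]
  set s := pvSha (pvRk R t) with hs
  have hmemset : s ∈ PySem.Set.ofList ((R.take t).map pvSha) ↔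
      s ∈ (R.take t).map pvSha := PySem.Set.mem_ofList _ s
  refine ⟨?_, ?_, ?_⟩
  · intro hcnt
    unfold pvDdup
    rw [hset, PySem.Set.add_eq_ite]
    by_cases hm : s ∈ PySem.Set.ofList ((R.take t).map pvSha)
    · rw [if_pos (by simpa using hm)]
    · rw [if_neg (by simpa using hm), List.filter_append]
      simp [hcnt]
  · intro hmem
    have hm : s ∈ PySem.Set.ofList ((R.take t).map pvSha) := (List.mem_filter.mp hmem).1
    unfold pvDdup
    rw [hset, PySem.Set.add_eq_ite, if_pos (by simpa using hm)]
  · intro hcnt hnot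
    have hm : s ∉ PySem.Set.ofList ((R.take t).map pvSha) := by
      intro hm
      exact hnot (List.mem_filter.mpr ⟨hm, by simpa using hcnt⟩)
    have hplus : pvDdup R (t + 1) = pvDdup R t ++ [s] := by
      unfold pvDdup
      rw [hset, PySem.Set.add_eq_ite, if_neg (by simpa using hm), List.filter_append]
      simp [hcnt]
    refine ⟨hplus, ?_⟩
    obtain ⟨tail, htail⟩ := pvDdupPrefix R (t + 1)
    rw [hplus] at htail
    rw [← htail, List.append_assoc, List.idxOf_append_of_notMem hnot]
    simp [List.idxOf_cons_self]
lemma pvRangeSet {α : Type} (f : Nat → α) (N t : Nat) (v : α) :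
    ((List.range N).map f).set t v =
      (List.range N).map (fun k => if k = t then v else f k) := by
  refine List.ext_getElem (by simp) ?_
  intro k h1 h2
  simp only [List.getElem_set, List.getElem_map, List.getElem_range]
  by_cases h : k = t
  · simp [h]
  · simp [h, (show ¬ t = k from fun hh => h (Eq.symm hh))]

lemma pvKeysLen {κ ν : Type} [BEq κ] (d : PySem.Dict κ ν) : d.keys.length = d.size := by
  simp [PySem.Dict.keys, PySem.Dict.size]

lemma pvB2 (R : List (PySem.Dict String String)) (counts : PySem.Dict String Int)
    (hc : ∀ s, counts.getD s 0 = ((pvShas R).count s : Int)) :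
    ∀ t, t ≤ R.length →
    (((List.range t).foldl (fun st k => pvBExact R counts st ((k : Nat) : Int))
        (R.map pvG0, PySem.Dict.empty)).1 =
      (List.range R.length).map (fun k => if k < t then pvEg R k else pvG0 (pvRk R k)) ∧
     ((List.range t).foldl (fun st k => pvBExact R counts st ((k : Nat) : Int))
        (R.map pvG0, PySem.Dict.empty)).2.keys = pvDdup R t ∧
     ∀ s ∈ pvDdup R t,
       ((List.range t).foldl (fun st k => pvBExact R counts st ((k : Nat) : Int))
          (R.map pvG0, PySem.Dict.empty)).2.getD s 0 = (((pvDup R).idxOf s : Nat) : Int) + 1) := by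
  intro t
  induction t with
  | zero =>
    intro _
    refine ⟨?_, by simp [pvDdup], by simp [pvDdup]⟩
    simp only [List.range_zero, List.foldl_nil]
    rw [pvMapGetD R pvG0 PySem.Dict.empty]
    simp [pvRk]
  | succ t ih =>
    intro ht
    have ht' : t < R.length := by omega
    obtain ⟨ih1, ih2, ih3⟩ := ih (by omega)
    rw [List.range_succ, List.foldl_append, List.foldl_cons, List.foldl_nil]
    set st := (List.range t).foldl (fun st k => pvBExact R counts st ((k : Nat) : Int))
      (R.map pvG0, PySem.Dict.empty) with hst
    have hsha : (PySem.List.pyGetD R ((t : Nat) : Int) PySem.Dict.empty).getD "sha256" "" =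
        pvSha (pvRk R t) := by
      rw [PySem.List.pyGetD_natCast]; rfl
    set s := pvSha (pvRk R t) with hsdef
    have hDS := pvDdupSucc R t ht'
    by_cases hcnt : 1 < (pvShas R).count s
    · -- duplicated sha: an exact id is assigned to position t
      have hcond : (1 < counts.getD s 0) := by
        rw [hc]; exact_mod_cast hcnt
      by_cases hmem : s ∈ pvDdup R t
      · have hcont : st.2.contains s = true := by
          rw [PySem.Dict.contains_eq_decide_mem_keys, ih2]; simpa using hmem
        have hstep : pvBExact R counts st ((t : Nat) : Int) =
            (PySem.List.pySetD st.1 ((t : Nat) : Int)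
              (some ("exact_duplicate_" ++ pvPad5 (st.2.getD s 0))), st.2) := by
          unfold pvBExact
          simp only [hsha]
          rw [if_pos hcond, if_pos hcont]
        rw [hstep]
        have hDd : pvDdup R (t + 1) = pvDdup R t := hDS.2.1 hmem
        refine ⟨?_, by simpa [hDd] using ih2, by simpa [hDd] using ih3⟩
        simp only [ih1, ih3 s hmem, PySem.List.pySetD_natCast, pvRangeSet]
        refine List.map_congr_left ?_
        intro k hk
        by_cases hkt : k = t
        · subst hkt
          simp only [if_pos rfl, if_pos (Nat.lt_succ_self k)]
          rw [pvEg, if_pos hcnt]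
          rfl
        · simp only [if_neg hkt]
          have : k < t ↔ k < t + 1 := by omega
          simp [this]
      · have hcont : st.2.contains s = false := by
          rw [PySem.Dict.contains_eq_decide_mem_keys, ih2]; simpa using hmem
        obtain ⟨hplus, hidx⟩ := hDS.2.2 hcnt hmem
        have hsize : st.2.size = (pvDdup R t).length := by rw [← pvKeysLen, ih2]
        have hgetD : (st.2.insert s ((st.2.size : Int) + 1)).getD s 0 =
            (((pvDup R).idxOf s : Nat) : Int) + 1 := by
          rw [PySem.Dict.getD_insert, if_pos rfl, hsize, hidx]
        have hstep : pvBExact R counts st ((t : Nat) : Int) =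
            (PySem.List.pySetD st.1 ((t : Nat) : Int)
              (some ("exact_duplicate_" ++ pvPad5 ((st.2.insert s ((st.2.size : Int) + 1)).getD s 0))),
             st.2.insert s ((st.2.size : Int) + 1)) := by
          unfold pvBExact
          simp only [hsha]
          rw [if_pos hcond, if_neg (by simp [hcont])]
        rw [hstep]
        refine ⟨?_, ?_, ?_⟩
        · simp only [ih1, hgetD, PySem.List.pySetD_natCast, pvRangeSet]
          refine List.map_congr_left ?_
          intro k hk
          by_cases hkt : k = t
          · subst hkt
            simp only [if_pos rfl, if_pos (Nat.lt_succ_self k)]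
            rw [pvEg, if_pos hcnt]
            rfl
          · simp only [if_neg hkt]
            have : k < t ↔ k < t + 1 := by omega
            simp [this]
        · rw [PySem.Dict.keys_insert_of_not_contains _ _ hcont, ih2, hplus]
        · intro s' hs'
          rw [hplus] at hs'
          rcases List.mem_append.mp hs' with h | h
          · have hne : s' ≠ s := by
              intro hh; subst hh; exact hmem h
            rw [PySem.Dict.getD_insert, if_neg hne]
            exact ih3 s' h
          · have : s' = s := by simpa using h
            subst this
            exact hgetD
    · -- sha occurs once: nothing happens at position t
      have hcond : ¬ (1 < counts.getD s 0) := by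
        rw [hc]; exact_mod_cast hcnt
      have hstep : pvBExact R counts st ((t : Nat) : Int) = st := by
        unfold pvBExact
        simp only [hsha]
        rw [if_neg hcond]
      rw [hstep]
      have hDd : pvDdup R (t + 1) = pvDdup R t := hDS.1 hcnt
      refine ⟨?_, by simpa [hDd] using ih2, by simpa [hDd] using ih3⟩
      rw [ih1]
      refine List.map_congr_left ?_
      intro k hk
      by_cases hkt : k = t
      · subst hkt
        simp only [if_pos (Nat.lt_succ_self k)]
        rw [if_neg (by omega), pvEg, if_neg hcnt]
      · have : k < t ↔ k < t + 1 := by omega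
        simp [this]

lemma pvSetGetD {α : Type} (xs : List α) (j : Nat) (v : α) (d : α) (hj : j < xs.length) (t : Nat) :
    (xs.set j v).getD t d = if t = j then v else xs.getD t d := by
  by_cases ht : t < xs.length
  · rw [List.getD_eq_getElem _ _ (by simpa [List.length_set] using ht)]
    simp only [List.getElem_set]
    by_cases h : t = j
    · simp [h]
    · rw [if_neg (fun hh => h (Eq.symm hh)), if_neg h]
      exact (List.getD_eq_getElem _ _ (by simpa using ht)).symm
  · have ht' := Nat.le_of_not_lt ht
    rw [List.getD_eq_default _ _ (by simpa [List.length_set] using ht'),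
        List.getD_eq_default _ _ (by simpa using ht')]
    rw [if_neg (fun h => ht (lt_of_eq_of_lt h hj))]

lemma pvBuckets (R : List (PySem.Dict String String)) (L : Option String) :
    ((PySem.List.pyRange 0 (R.length : Int) 1).foldl
      (fun d i => d.modify ((PySem.List.pyGetD R i PySem.Dict.empty).get? "label_name") []
        (fun b => b ++ [i])) PySem.Dict.empty).getD L [] =
    (PySem.List.pyRange 0 (R.length : Int) 1).filter
      (fun j => (PySem.List.pyGetD R j PySem.Dict.empty).get? "label_name" == L) := by
  rw [show ((PySem.List.pyRange 0 (R.length : Int) 1).foldl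
      (fun d i => d.modify ((PySem.List.pyGetD R i PySem.Dict.empty).get? "label_name") []
        (fun b => b ++ [i])) PySem.Dict.empty) =
    (((PySem.List.pyRange 0 (R.length : Int) 1).map
        (fun i => ((PySem.List.pyGetD R i PySem.Dict.empty).get? "label_name", i))).foldl
      (fun d p => d.modify p.1 [] (fun b => b ++ [p.2])) PySem.Dict.empty)
    from (List.foldl_map (f := fun i => ((PySem.List.pyGetD R i PySem.Dict.empty).get? "label_name", i))
      (g := fun (d : PySem.Dict (Option String) (List Int)) p => d.modify p.1 [] (fun b => b ++ [p.2]))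
      (l := PySem.List.pyRange 0 (R.length : Int) 1) (init := PySem.Dict.empty)).symm]
  rw [PySem.Dict.getD_foldl_modify_append, List.filter_map, List.map_map]
  simp [Function.comp_def]

lemma pvTruthyFalse (o : Option String) (h : pvTruthy o = false) : o.getD "" = "" := by
  simpa [pvTruthy] using h

lemma pvStartsGid (x : String) :
    PySem.Str.startswith ("near_duplicate_" ++ x) "near_duplicate_" = true := by
  rw [PySem.Str.startswith_eq]
  refine (PySem.Chars.startswith_iff _ _).mpr ?_
  rw [String.toList_append]
  exact List.prefix_append _ _

lemma pvStartsEmpty : PySem.Str.startswith "" "near_duplicate_" = false := by decide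

-- lookups other than duplicate_group_id see through the relation
lemma pvRelTruthy (R recs : List (PySem.Dict String String)) (gids : List (Option String))
    (hrel : pvRel R recs gids) (k : Nat) (hk : k < R.length) :
    pvTruthy ((recs.getD k PySem.Dict.empty).get? "duplicate_group_id") =
      pvTruthy (gids.getD k none) := by
  rcases hrel.2.2 k hk with ⟨h1, h2⟩ | ⟨g, h1, h2⟩
  · rw [h1, h2]; rfl
  · rw [h1, h2, PySem.Dict.get?_insert_self]

lemma pvRelDup (R recs : List (PySem.Dict String String)) (gids : List (Option String))
    (hrel : pvRel R recs gids) (k : Nat) (hk : k < R.length) :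
    (recs.getD k PySem.Dict.empty).getD "duplicate_group_id" "" =
      (gids.getD k none).getD "" := by
  rcases hrel.2.2 k hk with ⟨h1, h2⟩ | ⟨g, h1, h2⟩
  · rw [h1, h2, PySem.Dict.getD_eq_get?_getD]; rfl
  · rw [h1, h2, PySem.Dict.getD_eq_get?_getD, PySem.Dict.get?_insert_self]

def pvInnerInv (R recsP : List (PySem.Dict String String)) (gidsP : List (Option String))
    (i : Nat) (gid : String)
    (recs : List (PySem.Dict String String)) (gb : List (Option String) × Bool) : Prop :=
  recs.length = R.length ∧ gb.1.length = R.length ∧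
  (∀ k, k < R.length → k ≠ i →
    (recs.getD k PySem.Dict.empty = recsP.getD k PySem.Dict.empty ∧
      gb.1.getD k none = gidsP.getD k none) ∨
    (recs.getD k PySem.Dict.empty = (pvRk R k).insert "duplicate_group_id" gid ∧
      gb.1.getD k none = some gid)) ∧
  gb.1.getD i none = gidsP.getD i none ∧
  ((gb.2 = true ∧ recs.getD i PySem.Dict.empty = (pvRk R i).insert "duplicate_group_id" gid) ∨
   (gb.2 = false ∧ recs.getD i PySem.Dict.empty = recsP.getD i PySem.Dict.empty))

lemma pvInnerSim (R : List (PySem.Dict String String)) (m : Int) (i : Nat) (hiN : i < R.length)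
    (recsP : List (PySem.Dict String String)) (gidsP : List (Option String))
    (hrel : pvRel R recsP gidsP) (ng : Int) :
    ∀ (l : List Int), (∀ j ∈ l, (i : Int) < j ∧ j < (R.length : Int)) →
    ∀ (recs : List (PySem.Dict String String)) (gb : List (Option String) × Bool),
    pvInnerInv R recsP gidsP i ("near_duplicate_" ++ pvPad5 ng) recs gb →
    pvInnerInv R recsP gidsP i ("near_duplicate_" ++ pvPad5 ng)
      (l.foldl (pvAInner m (i : Int) ng) recs)
      (l.foldl (fun p j =>
        if (PySem.List.pyGetD R j PySem.Dict.empty).get? "label_name" == pvLab (pvRk R i)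
        then pvBInner R m (i : Int) ((pvRk R i).getD "average_hash" "")
          ("near_duplicate_" ++ pvPad5 ng) p j else p) gb) := by
  set gid := "near_duplicate_" ++ pvPad5 ng with hgid
  intro l
  induction l with
  | nil => intro _ recs gb hinv; simpa using hinv
  | cons j l' ih =>
    intro hb recs gb hinv
    obtain ⟨hij, hjN⟩ := hb j (by simp)
    set jn := j.toNat with hjn
    have hjcast : ((jn : Nat) : Int) = j := Int.toNat_of_nonneg (by omega)
    have hjnN : jn < R.length := by omega
    have hjni : jn ≠ i := by omega
    obtain ⟨hlr, hlg, hcl, hgi, hhit⟩ := hinv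
    -- every record slot of the scan state is the original one, possibly with an
    -- inserted duplicate_group_id
    have hform : ∀ k, k < R.length →
        recs.getD k PySem.Dict.empty = pvRk R k ∨
        ∃ g, recs.getD k PySem.Dict.empty = (pvRk R k).insert "duplicate_group_id" g := by
      intro k hk
      by_cases hki : k = i
      · subst hki
        rcases hhit with ⟨_, h⟩ | ⟨_, h⟩
        · exact Or.inr ⟨gid, h⟩
        · rw [h]
          rcases hrel.2.2 k hk with ⟨h1, _⟩ | ⟨g, h1, _⟩
          · exact Or.inl h1
          · exact Or.inr ⟨g, h1⟩
      · rcases hcl k hk hki with ⟨h1, _⟩ | ⟨h1, _⟩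
        · rw [h1]
          rcases hrel.2.2 k hk with ⟨h2, _⟩ | ⟨g, h2, _⟩
          · exact Or.inl h2
          · exact Or.inr ⟨g, h2⟩
        · exact Or.inr ⟨gid, h1⟩
    have hget : ∀ k, k < R.length → ∀ key, key ≠ "duplicate_group_id" →
        (recs.getD k PySem.Dict.empty).get? key = (pvRk R k).get? key := by
      intro k hk key hne
      rcases hform k hk with h | ⟨g, h⟩
      · rw [h]
      · rw [h, PySem.Dict.get?_insert_of_ne _ _ hne]
    have hgetD : ∀ k, k < R.length →
        (recs.getD k PySem.Dict.empty).getD "average_hash" "" =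
          (pvRk R k).getD "average_hash" "" := by
      intro k hk
      rw [PySem.Dict.getD_eq_get?_getD, PySem.Dict.getD_eq_get?_getD,
        hget k hk "average_hash" (by decide)]
    -- the j-th slot's truthiness agrees between the two states
    have htr : pvTruthy ((recs.getD jn PySem.Dict.empty).get? "duplicate_group_id") =
        pvTruthy (gb.1.getD jn none) := by
      rcases hcl jn hjnN hjni with ⟨h1, h2⟩ | ⟨h1, h2⟩
      · rw [h1, h2]; exact pvRelTruthy R recsP gidsP hrel jn hjnN
      · rw [h1, h2, PySem.Dict.get?_insert_self]
    -- evaluate one A step and one B step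
    have hAgetj : PySem.List.pyGetD recs j PySem.Dict.empty = recs.getD jn PySem.Dict.empty := by
      rw [← hjcast, PySem.List.pyGetD_natCast]
    have hAgeti : PySem.List.pyGetD recs (i : Int) PySem.Dict.empty =
        recs.getD i PySem.Dict.empty := PySem.List.pyGetD_natCast ..
    have hBgetj : PySem.List.pyGetD R j PySem.Dict.empty = pvRk R jn := by
      rw [← hjcast, PySem.List.pyGetD_natCast]; rfl
    have hBgetgj : PySem.List.pyGetD gb.1 j none = gb.1.getD jn none := by
      rw [← hjcast, PySem.List.pyGetD_natCast]
    have hreci : (recs.getD i PySem.Dict.empty).get? "label_name" = pvLab (pvRk R i) :=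
      hget i hiN "label_name" (by decide)
    have hrecih : (recs.getD i PySem.Dict.empty).getD "average_hash" "" =
        (pvRk R i).getD "average_hash" "" := hgetD i hiN
    simp only [List.foldl_cons]
    by_cases htruthy : pvTruthy (gb.1.getD jn none) = true
    · -- j is already assigned: both sides skip
      have hA : pvAInner m (i : Int) ng recs j = recs := by
        unfold pvAInner
        simp only [hAgetj]
        rw [if_pos (htr.trans htruthy)]
      have hB : (if (PySem.List.pyGetD R j PySem.Dict.empty).get? "label_name" == pvLab (pvRk R i)
          then pvBInner R m (i : Int) ((pvRk R i).getD "average_hash" "") gid gb j else gb) = gb := by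
        by_cases hl : (PySem.List.pyGetD R j PySem.Dict.empty).get? "label_name" == pvLab (pvRk R i)
        · rw [if_pos hl]
          unfold pvBInner
          simp only [hBgetgj, hBgetj]
          rw [if_neg (by rintro ⟨-, h2, -⟩; rw [htruthy] at h2; cases h2)]
        · rw [if_neg hl]
      rw [hA, hB]
      exact ih (fun x hx => hb x (by simp [hx])) recs gb ⟨hlr, hlg, hcl, hgi, hhit⟩
    · have htruthy' : pvTruthy (gb.1.getD jn none) = false := by
        simpa using htruthy
      by_cases hlab : (pvRk R jn).get? "label_name" = pvLab (pvRk R i)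
      case neg =>
        -- different labels: both sides skip
        have hA : pvAInner m (i : Int) ng recs j = recs := by
          unfold pvAInner
          simp only [hAgetj, hAgeti]
          rw [if_neg (by rw [htr, htruthy']; simp), if_pos ?hne]
          case hne =>
            rw [hreci, hget jn hjnN "label_name" (by decide)]
            exact fun h => hlab (Eq.symm h)
        have hB : (if (PySem.List.pyGetD R j PySem.Dict.empty).get? "label_name" == pvLab (pvRk R i)
            then pvBInner R m (i : Int) ((pvRk R i).getD "average_hash" "") gid gb j else gb) = gb := by
          rw [if_neg (by rw [hBgetj]; simpa using hlab)]
        rw [hA, hB]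
        exact ih (fun x hx => hb x (by simp [hx])) recs gb ⟨hlr, hlg, hcl, hgi, hhit⟩
      case pos =>
        by_cases hdist : pvHamming ((pvRk R i).getD "average_hash" "")
            ((pvRk R jn).getD "average_hash" "") ≤ m
        · -- a near-duplicate match: A inserts on i and j, B records j and the hit
          have hA : pvAInner m (i : Int) ng recs j =
              pvSetKey (pvSetKey recs (i : Int) "duplicate_group_id" gid) j "duplicate_group_id" gid := by
            unfold pvAInner
            simp only [hAgetj, hAgeti]
            rw [if_neg (by rw [htr, htruthy']; simp),
              if_neg (by rw [hreci, hget jn hjnN "label_name" (by decide), hlab]; simp),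
              if_pos (by rw [hrecih, hgetD jn hjnN]; exact hdist)]
          have hB : (if (PySem.List.pyGetD R j PySem.Dict.empty).get? "label_name" == pvLab (pvRk R i)
              then pvBInner R m (i : Int) ((pvRk R i).getD "average_hash" "") gid gb j else gb) =
              (PySem.List.pySetD gb.1 j (some gid), true) := by
            rw [if_pos (by rw [hBgetj]; simpa using hlab)]
            unfold pvBInner
            simp only [hBgetgj, hBgetj]
            rw [if_pos ⟨by omega, htruthy', hdist⟩]
          rw [hA, hB]
          refine ih (fun x hx => hb x (by simp [hx])) _ _ ?_
          -- re-establish the invariant for the updated states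
          have hlen1 : (pvSetKey recs (i : Int) "duplicate_group_id" gid).length = recs.length :=
            pvSetKeyLen ..
          have hstepA : ∀ t : Nat,
              (pvSetKey (pvSetKey recs (i : Int) "duplicate_group_id" gid) j "duplicate_group_id" gid).getD t PySem.Dict.empty =
              if t = jn then ((pvSetKey recs (i : Int) "duplicate_group_id" gid).getD jn PySem.Dict.empty).insert "duplicate_group_id" gid
              else (pvSetKey recs (i : Int) "duplicate_group_id" gid).getD t PySem.Dict.empty := by
            intro t
            rw [← hjcast]
            exact pvSetKeyGetD _ jn _ gid (by omega) t
          have hstepA' : ∀ t : Nat,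
              (pvSetKey recs (i : Int) "duplicate_group_id" gid).getD t PySem.Dict.empty =
              if t = i then (recs.getD i PySem.Dict.empty).insert "duplicate_group_id" gid
              else recs.getD t PySem.Dict.empty := by
            intro t
            exact pvSetKeyGetD _ i _ gid (by omega) t
          have hstepB : ∀ t : Nat, t < R.length →
              (PySem.List.pySetD gb.1 j (some gid)).getD t none =
              if t = jn then some gid else gb.1.getD t none := by
            intro t ht
            rw [← hjcast, PySem.List.pySetD_natCast]
            exact pvSetGetD _ jn _ none (by omega) t
          have hinsj : (recs.getD jn PySem.Dict.empty).insert "duplicate_group_id" gid =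
              (pvRk R jn).insert "duplicate_group_id" gid := by
            rcases hform jn hjnN with h | ⟨g, h⟩
            · rw [h]
            · rw [h, PySem.Dict.insert_insert_self]
          have hinsi : (recs.getD i PySem.Dict.empty).insert "duplicate_group_id" gid =
              (pvRk R i).insert "duplicate_group_id" gid := by
            rcases hform i hiN with h | ⟨g, h⟩
            · rw [h]
            · rw [h, PySem.Dict.insert_insert_self]
          refine ⟨by rw [pvSetKeyLen, hlen1, hlr], ?_, ?_, ?_, ?_⟩
          · simp only [← hjcast, PySem.List.pySetD_natCast, List.length_set]
            exact hlg
          · intro k hk hki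
            by_cases hkj : k = jn
            · refine Or.inr ⟨?_, ?_⟩
              · rw [hstepA k, if_pos hkj, hkj, hstepA' jn, if_neg hjni, hinsj]
              · rw [hstepB k hk, if_pos hkj]
            · rw [hstepA k, if_neg hkj, hstepA' k, if_neg hki, hstepB k hk, if_neg hkj]
              exact hcl k hk hki
          · rw [hstepB i hiN, if_neg (fun h => hjni (Eq.symm h))]
            exact hgi
          · refine Or.inl ⟨rfl, ?_⟩
            rw [hstepA i, if_neg (fun h => hjni (Eq.symm h)), hstepA' i, if_pos rfl, hinsi]
        · -- distance too large: both sides skip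
          have hA : pvAInner m (i : Int) ng recs j = recs := by
            unfold pvAInner
            simp only [hAgetj, hAgeti]
            rw [if_neg (by rw [htr, htruthy']; simp),
              if_neg (by rw [hreci, hget jn hjnN "label_name" (by decide), hlab]; simp),
              if_neg (by rw [hrecih, hgetD jn hjnN]; exact hdist)]
          have hB : (if (PySem.List.pyGetD R j PySem.Dict.empty).get? "label_name" == pvLab (pvRk R i)
              then pvBInner R m (i : Int) ((pvRk R i).getD "average_hash" "") gid gb j else gb) = gb := by
            rw [if_pos (by rw [hBgetj]; simpa using hlab)]
            unfold pvBInner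
            simp only [hBgetgj, hBgetj]
            rw [if_neg (by rintro ⟨-, -, hd⟩; exact hdist hd)]
          rw [hA, hB]
          exact ih (fun x hx => hb x (by simp [hx])) recs gb ⟨hlr, hlg, hcl, hgi, hhit⟩

lemma pvOuterSim (R : List (PySem.Dict String String)) (m : Int)
    (buckets : PySem.Dict (Option String) (List Int))
    (hbk : ∀ L, buckets.getD L [] = (PySem.List.pyRange 0 (R.length : Int) 1).filter
      (fun j => (PySem.List.pyGetD R j PySem.Dict.empty).get? "label_name" == L)) :
    ∀ (l : List Int), (∀ x ∈ l, 0 ≤ x ∧ x < (R.length : Int)) →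
    ∀ (recs : List (PySem.Dict String String)) (gids : List (Option String)) (ng : Int),
    pvRel R recs gids →
    pvRel R (l.foldl (pvAStep m (R.length : Int)) (recs, ng)).1
      (l.foldl (pvBStep R m buckets) (gids, ng)).1 ∧
    (l.foldl (pvAStep m (R.length : Int)) (recs, ng)).2 =
      (l.foldl (pvBStep R m buckets) (gids, ng)).2 := by
  intro l
  induction l with
  | nil => intro _ recs gids ng hrel; exact ⟨hrel, rfl⟩
  | cons i l' ih =>
    intro hb recs gids ng hrel
    obtain ⟨hi0, hiN'⟩ := hb i (by simp)
    set iN := i.toNat with hiNdef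
    have hic : ((iN : Nat) : Int) = i := Int.toNat_of_nonneg hi0
    have hiN : iN < R.length := by omega
    have htr := pvRelTruthy R recs gids hrel iN hiN
    simp only [List.foldl_cons]
    rw [← hic]
    by_cases htruthy : pvTruthy (gids.getD iN none) = true
    · -- the record already carries a truthy id: both loops skip it
      have hA : pvAStep m (R.length : Int) (recs, ng) ((iN : Nat) : Int) = (recs, ng) := by
        unfold pvAStep
        simp only [PySem.List.pyGetD_natCast]
        rw [if_pos (htr.trans htruthy)]
      have hB : pvBStep R m buckets (gids, ng) ((iN : Nat) : Int) = (gids, ng) := by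
        unfold pvBStep
        simp only [PySem.List.pyGetD_natCast]
        rw [if_pos htruthy]
      rw [hA, hB]
      exact ih (fun x hx => hb x (by simp [hx])) recs gids ng hrel
    · have htruthy' : pvTruthy (gids.getD iN none) = false := by simpa using htruthy
      set gid := "near_duplicate_" ++ pvPad5 ng with hgiddef
      set recs' := (PySem.List.pyRange ((iN : Int) + 1) (R.length : Int) 1).foldl
        (pvAInner m ((iN : Nat) : Int) ng) recs with hrecs'
      set scan := (PySem.List.pyRange ((iN : Int) + 1) (R.length : Int) 1).foldl
        (fun p j => if (PySem.List.pyGetD R j PySem.Dict.empty).get? "label_name" == pvLab (pvRk R iN)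
          then pvBInner R m ((iN : Nat) : Int) ((pvRk R iN).getD "average_hash" "") gid p j else p)
        (gids, false) with hscandef
      -- B's bucket scan is the guarded scan over the whole index range
      have hscan : (buckets.getD ((R.getD iN PySem.Dict.empty).get? "label_name") []).foldl
            (pvBInner R m ((iN : Nat) : Int) ((R.getD iN PySem.Dict.empty).getD "average_hash" "") gid)
            (gids, false) = scan := by
        show (buckets.getD (pvLab (pvRk R iN)) []).foldl
          (pvBInner R m ((iN : Nat) : Int) ((pvRk R iN).getD "average_hash" "") gid) (gids, false) = scan
        rw [hbk, ← PySem.List.foldl_if_eq_foldl_filter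
          (p := fun j => (PySem.List.pyGetD R j PySem.Dict.empty).get? "label_name" == pvLab (pvRk R iN))
          (f := pvBInner R m ((iN : Nat) : Int) ((pvRk R iN).getD "average_hash" "") gid)]
        rw [PySem.List.pyRange_one_append 0 ((iN : Int) + 1) (R.length : Int) (by omega) (by omega),
          List.foldl_append]
        have hskip : ∀ (acc : List (Option String) × Bool) (x : Int),
            x ∈ PySem.List.pyRange 0 ((iN : Int) + 1) 1 →
            (if ((PySem.List.pyGetD R x PySem.Dict.empty).get? "label_name" == pvLab (pvRk R iN)) = true
             then pvBInner R m ((iN : Nat) : Int) ((pvRk R iN).getD "average_hash" "") gid acc x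
             else acc) = acc := by
          intro acc x hx
          have hxlt : x < (iN : Int) + 1 := (PySem.List.mem_pyRange_one.mp hx).2
          by_cases hl : ((PySem.List.pyGetD R x PySem.Dict.empty).get? "label_name" == pvLab (pvRk R iN)) = true
          · rw [if_pos hl]
            unfold pvBInner
            rw [if_neg (by rintro ⟨hlt, -, -⟩; omega)]
          · rw [if_neg hl]
        rw [PySem.List.foldl_congr_mem _ _ (fun acc _ => acc) _ hskip, PySem.List.foldl_ignore, ← hscandef]
      have hinner := pvInnerSim R m iN hiN recs gids hrel ng
        (PySem.List.pyRange ((iN : Int) + 1) (R.length : Int) 1)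
        (by intro j hj
            have := PySem.List.mem_pyRange_one.mp hj
            constructor <;> omega)
        recs (gids, false)
        ⟨hrel.1, hrel.2.1, fun k hk hki => Or.inl ⟨rfl, rfl⟩, rfl, Or.inr ⟨rfl, rfl⟩⟩
      rw [← hrecs', ← hscandef] at hinner
      obtain ⟨hlr', hlg', hcl', hgi', hhit'⟩ := hinner
      have hA : pvAStep m (R.length : Int) (recs, ng) ((iN : Nat) : Int) =
          (recs', if PySem.Str.startswith ((recs'.getD iN PySem.Dict.empty).getD "duplicate_group_id" "")
            "near_duplicate_" = true then ng + 1 else ng) := by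
        unfold pvAStep
        simp only [PySem.List.pyGetD_natCast]
        rw [if_neg (by rw [htr, htruthy']; simp)]
        rw [← hrecs']
        split_ifs <;> rfl
      have hB : pvBStep R m buckets (gids, ng) ((iN : Nat) : Int) =
          (if scan.2 = true then (PySem.List.pySetD scan.1 ((iN : Nat) : Int) (some gid), ng + 1)
           else (scan.1, ng)) := by
        unfold pvBStep
        simp only [PySem.List.pyGetD_natCast]
        rw [if_neg (by rw [htruthy']; simp)]
        rw [hscan]
      rw [hA, hB]
      rcases hhit' with ⟨hh2, hh1⟩ | ⟨hh2, hh1⟩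
      · -- the anchor matched: both sides record the group and count it
        have hdup : (recs'.getD iN PySem.Dict.empty).getD "duplicate_group_id" "" = gid := by
          rw [hh1, PySem.Dict.getD_eq_get?_getD, PySem.Dict.get?_insert_self]
          rfl
        rw [hdup, hgiddef, pvStartsGid, if_pos rfl, if_pos hh2]
        refine ih (fun x hx => hb x (by simp [hx])) _ _ _ ?_
        refine ⟨hlr', ?_, ?_⟩
        · rw [PySem.List.pySetD_natCast, List.length_set, hlg']
        · intro k hk
          have hsetk : (PySem.List.pySetD scan.1 ((iN : Nat) : Int) (some gid)).getD k none =
              if k = iN then some gid else scan.1.getD k none := by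
            rw [PySem.List.pySetD_natCast]
            exact pvSetGetD _ iN _ none (by omega) k
          by_cases hki : k = iN
          · refine Or.inr ⟨gid, ?_, ?_⟩
            · rw [hki, hh1]
            · rw [hsetk, if_pos hki]
          · rw [hsetk, if_neg hki]
            rcases hcl' k hk hki with ⟨h1, h2⟩ | ⟨h1, h2⟩
            · rw [h1, h2]
              exact hrel.2.2 k hk
            · exact Or.inr ⟨gid, h1, h2⟩
      · -- no match: the anchor keeps its falsy id and the counter is unchanged
        have hdup : (recs'.getD iN PySem.Dict.empty).getD "duplicate_group_id" "" = "" := by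
          rw [hh1, pvRelDup R recs gids hrel iN hiN, pvTruthyFalse _ htruthy']
        rw [hdup, pvStartsEmpty, if_neg (by simp), if_neg (by rw [hh2]; simp)]
        refine ih (fun x hx => hb x (by simp [hx])) _ _ _ ?_
        refine ⟨hlr', hlg', ?_⟩
        intro k hk
        by_cases hki : k = iN
        · rw [hki, hh1, hgi']
          exact hrel.2.2 iN hiN
        · rcases hcl' k hk hki with ⟨h1, h2⟩ | ⟨h1, h2⟩
          · rw [h1, h2]
            exact hrel.2.2 k hk
          · exact Or.inr ⟨gid, h1, h2⟩

lemma pvGetDinsNe (d : PySem.Dict String String) (k k' v dflt : String) (h : k' ≠ k) :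
    (d.insert k v).getD k' dflt = d.getD k' dflt := by
  rw [PySem.Dict.getD_eq_get?_getD, PySem.Dict.get?_insert_of_ne _ _ h,
    ← PySem.Dict.getD_eq_get?_getD]

lemma pvFinalPoint (r0 rec : PySem.Dict String String) (g : Option String)
    (hcase : (rec = r0 ∧ g = pvG0 r0) ∨
      (∃ gv, rec = r0.insert "duplicate_group_id" gv ∧ g = some gv)) :
    (let dup := rec.getD "duplicate_group_id" ""
     let r := rec.insert "duplicate_group_id" dup
     let gid := if pvTruthy (r.get? "patient_id") then (r.get? "patient_id").getD ""
                else if dup ≠ "" then dup else r.getD "sample_id" ""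
     (r.insert "group_id" gid).items) =
    (let dup := g.getD ""
     let r2 := r0.insert "duplicate_group_id" dup
     let gid := if pvTruthy (r0.get? "patient_id") then (r0.get? "patient_id").getD ""
                else if dup ≠ "" then dup else r0.getD "sample_id" ""
     (r2.insert "group_id" gid).items) := by
  rcases hcase with ⟨hr, hg⟩ | ⟨gv, hr, hg⟩
  · subst hr; subst hg
    simp only [pvG0, ← PySem.Dict.getD_eq_get?_getD]
    rw [PySem.Dict.get?_insert_of_ne _ _ (by decide : ("patient_id" : String) ≠ "duplicate_group_id"),
      pvGetDinsNe _ _ _ _ _ (by decide : ("patient_id" : String) ≠ "duplicate_group_id"),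
      pvGetDinsNe _ _ _ _ _ (by decide : ("sample_id" : String) ≠ "duplicate_group_id")]
  · subst hr; subst hg
    have hdup : (r0.insert "duplicate_group_id" gv).getD "duplicate_group_id" "" = gv := by
      rw [PySem.Dict.getD_eq_get?_getD, PySem.Dict.get?_insert_self]
      rfl
    simp only [hdup, PySem.Dict.insert_insert_self, Option.getD_some]
    rw [PySem.Dict.get?_insert_of_ne _ _ (by decide : ("patient_id" : String) ≠ "duplicate_group_id"),
      pvGetDinsNe _ _ _ _ _ (by decide : ("sample_id" : String) ≠ "duplicate_group_id")]

lemma pvFinal (R recs : List (PySem.Dict String String)) (gids : List (Option String))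
    (hrel : pvRel R recs gids) :
    recs.map (fun r =>
      let dup := r.getD "duplicate_group_id" ""
      let r := r.insert "duplicate_group_id" dup
      let gid := if pvTruthy (r.get? "patient_id") then (r.get? "patient_id").getD ""
                 else if dup ≠ "" then dup else r.getD "sample_id" ""
      (r.insert "group_id" gid).items) =
    (R.zip gids).map (fun p =>
      let dup := p.2.getD ""
      let r2 := p.1.insert "duplicate_group_id" dup
      let gid := if pvTruthy (p.1.get? "patient_id") then (p.1.get? "patient_id").getD ""
                 else if dup ≠ "" then dup else p.1.getD "sample_id" ""
      (r2.insert "group_id" gid).items) := by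
  refine List.ext_getElem (by simp [hrel.1, hrel.2.1]) ?_
  intro k h1 h2
  have hk : k < R.length := by simpa [hrel.1] using h1
  have hkr : k < recs.length := by simpa using h1
  have hkg : k < gids.length := by rw [hrel.2.1]; exact hk
  simp only [List.getElem_map, List.getElem_zip]
  have e1 : recs[k] = recs.getD k PySem.Dict.empty := (List.getD_eq_getElem _ _ hkr).symm
  have e2 : R[k]'hk = pvRk R k := (List.getD_eq_getElem _ _ hk).symm
  have e3 : gids[k] = gids.getD k none := (List.getD_eq_getElem _ _ hkg).symm
  rw [e1, e2, e3]
  refine pvFinalPoint (pvRk R k) _ _ ?_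
  rcases hrel.2.2 k hk with ⟨ha, hb⟩ | ⟨gv, ha, hb⟩
  · exact Or.inl ⟨ha, hb⟩
  · exact Or.inr ⟨gv, ha, hb⟩

lemma pvIdxsLen (R : List (PySem.Dict String String)) (s : String) :
    (pvIdxs R s).length = (pvShas R).count s := by
  unfold pvIdxs
  rw [List.length_map, ← List.countP_eq_length_filter]
  rw [show pvShas R = (List.range R.length).map (fun k => pvSha (pvRk R k)) from
    pvMapGetD R pvSha PySem.Dict.empty]
  rw [List.count_eq_countP, List.countP_map]
  rfl

lemma pvMemDup (R : List (PySem.Dict String String)) (t : Nat) (ht : t < R.length) :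
    (pvSha (pvRk R t) ∈ pvDup R) ↔ 1 < (pvShas R).count (pvSha (pvRk R t)) := by
  unfold pvDup
  rw [List.mem_filter]
  constructor
  · rintro ⟨-, h⟩; simpa using h
  · intro h
    refine ⟨(PySem.Set.mem_ofList _ _).mpr ?_, by simpa using h⟩
    unfold pvShas
    refine List.mem_map.mpr ⟨pvRk R t, ?_, rfl⟩
    rw [pvRk, List.getD_eq_getElem _ _ ht]
    exact List.getElem_mem ht

lemma pvA1 (R : List (PySem.Dict String String)) :
    (((PySem.List.enumerate R 0).foldl
      (fun d p => d.modify (p.2.getD "sha256" "") [] (fun g => g ++ [p.1]))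
      PySem.Dict.empty).values.filter (fun g => 1 < g.length)) = (pvDup R).map (pvIdxs R) := by
  set D := (PySem.List.enumerate R 0).foldl
    (fun d p => d.modify (p.2.getD "sha256" "") [] (fun g => g ++ [p.1])) PySem.Dict.empty with hD
  have hkeys : D.keys = PySem.Set.ofList (pvShas R) := by
    rw [hD, PySem.Dict.keys_foldl_modify_key (PySem.List.enumerate R 0)
      (fun p => p.2.getD "sha256" "") [] (fun _ p g => g ++ [p.1]) PySem.Dict.empty]
    rw [show (PySem.List.enumerate R 0).map (fun p => p.2.getD "sha256" "") = pvShas R from ?_]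
    · rw [PySem.Dict.keys_empty]
      rfl
    · rw [show (fun (p : Int × PySem.Dict String String) => p.2.getD "sha256" "") =
        (pvSha ∘ fun p => p.2) from rfl, ← List.map_map, PySem.List.map_snd_enumerate]
      rfl
  have hnodup : D.keys.Nodup := by
    rw [hD]
    exact PySem.Dict.nodup_keys_foldl_modify_key _ _ _ _ _ (by simp)
  have hgetD : ∀ s, D.getD s [] = pvIdxs R s := by
    intro s
    rw [hD, show (PySem.List.enumerate R 0).foldl
        (fun d p => d.modify (p.2.getD "sha256" "") [] (fun g => g ++ [p.1])) PySem.Dict.empty =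
      ((PySem.List.enumerate R 0).map (fun p => (p.2.getD "sha256" "", p.1))).foldl
        (fun d q => d.modify q.1 [] (fun g => g ++ [q.2])) PySem.Dict.empty from
      (List.foldl_map (f := fun (p : Int × PySem.Dict String String) => (p.2.getD "sha256" "", p.1))
        (g := fun (d : PySem.Dict String (List Int)) q => d.modify q.1 [] (fun g => g ++ [q.2]))
        (l := PySem.List.enumerate R 0) (init := PySem.Dict.empty)).symm]
    rw [PySem.Dict.getD_foldl_modify_append]
    rw [pvEnumEq R PySem.Dict.empty 0]
    rw [List.map_map, List.filter_map, List.map_map]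
    simp [Function.comp_def, pvIdxs, pvSha, pvRk]
  have hvals : D.values = (PySem.Set.ofList (pvShas R)).map (fun s => pvIdxs R s) := by
    rw [PySem.Dict.values_eq_map_keys D hnodup [], hkeys]
    exact List.map_congr_left (fun s _ => hgetD s)
  rw [hvals, List.filter_map]
  rw [List.filter_congr (q := fun s => 1 < (pvShas R).count s) ?hq]
  case hq =>
    intro s _
    simp only [Function.comp_apply, pvIdxsLen]
  rfl

theorem pv_main : ∀ (records : List (List (String × String))) (max_hash_distance : Int),
    assign_duplicate_groups records max_hash_distance = assign_duplicate_groups_alt records max_hash_distance := by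
  intro records m
  unfold assign_duplicate_groups assign_duplicate_groups_alt
  simp only []
  set R : List (PySem.Dict String String) := records.map PySem.Dict.ofList with hR
  -- A's exact-duplicate phase, characterized pointwise
  set recs1 := List.foldl
      (fun recs p =>
        List.foldl (fun recs idx => pvSetKey recs idx "duplicate_group_id" ("exact_duplicate_" ++ pvPad5 p.1))
          recs p.2)
      R
      (PySem.List.enumerate
        (List.filter (fun g => decide (1 < g.length))
          (List.foldl (fun d p => d.modify (p.2.getD "sha256" "") [] fun g => g ++ [p.1]) PySem.Dict.empty
              (PySem.List.enumerate R)).values)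
        1) with hrecs1
  have hA2 := pvA2 R (pvDup R) 1 R rfl (List.Nodup.filter _ (PySem.Set.nodup_ofList _))
  have hconv : recs1 = (PySem.List.enumerate (pvDup R) 1).foldl
      (fun recs p => (pvIdxs R p.2).foldl
        (fun recs idx => pvSetKey recs idx "duplicate_group_id" ("exact_duplicate_" ++ pvPad5 p.1)) recs)
      R := by
    rw [hrecs1, pvA1 R, pvEnumMap (pvDup R) (pvIdxs R) 1, List.foldl_map]
  -- B's exact-duplicate phase
  set counts : PySem.Dict String Int := List.foldl (fun d r => d.insert (r.getD "sha256" "") (d.getD (r.getD "sha256" "") 0 + 1))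
    PySem.Dict.empty R with hcounts
  set gids1 := (List.foldl (pvBExact R counts)
    (List.map (fun r => r.get? "duplicate_group_id") R, PySem.Dict.empty)
    (PySem.List.pyRange 0 (R.length : Int) 1)).1 with hgids1
  have hBconv : gids1 = ((List.range R.length).foldl
      (fun st k => pvBExact R counts st ((k : Nat) : Int)) (R.map pvG0, PySem.Dict.empty)).1 := by
    rw [hgids1, PySem.List.pyRange_zero_nat, List.foldl_map]
    rfl
  have hB2 := pvB2 R counts (fun s => by rw [hcounts]; exact pvB1 R s) R.length le_rfl
  have hgids1eq : gids1 = (List.range R.length).map (pvEg R) := by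
    rw [hBconv, hB2.1]
    refine List.map_congr_left ?_
    intro k hk
    rw [if_pos (List.mem_range.mp hk)]
  -- the two exact phases agree
  have hrel1 : pvRel R recs1 gids1 := by
    refine ⟨by rw [hconv]; exact hA2.1, by rw [hgids1eq]; simp, ?_⟩
    intro k hk
    have hrk : recs1.getD k PySem.Dict.empty =
        if pvSha (pvRk R k) ∈ pvDup R then
          (R.getD k PySem.Dict.empty).insert "duplicate_group_id"
            ("exact_duplicate_" ++ pvPad5 (1 + ((pvDup R).idxOf (pvSha (pvRk R k)) : Int)))
        else R.getD k PySem.Dict.empty := by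
      rw [hconv]; exact hA2.2 k hk
    have hgk : gids1.getD k none = pvEg R k := by
      rw [hgids1eq, pvRangeGetD, if_pos hk]
    by_cases hdup : 1 < (pvShas R).count (pvSha (pvRk R k))
    · refine Or.inr ⟨pvExGid R (pvSha (pvRk R k)), ?_, ?_⟩
      · rw [hrk, if_pos ((pvMemDup R k hk).mpr hdup)]
        unfold pvExGid
        rw [Int.add_comm]
        rfl
      · rw [hgk, pvEg, if_pos hdup]
    · refine Or.inl ⟨?_, ?_⟩
      · rw [hrk, if_neg (fun h => hdup ((pvMemDup R k hk).mp h))]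
        rfl
      · rw [hgk, pvEg, if_neg hdup]
  -- the near-duplicate phase preserves the relation
  have hrel2 := (pvOuterSim R m _ (fun L => pvBuckets R L)
    (PySem.List.pyRange 0 (R.length : Int) 1)
    (by intro x hx
        have := PySem.List.mem_pyRange_one.mp hx
        exact ⟨this.1, this.2⟩)
    recs1 gids1 1 hrel1).1
  exact pvFinal R _ _ hrel2

-- ===== VERDICT (by name: the statement is the Claim_ definition above) =====
theorem assign_duplicate_groups_spec : Claim_equal_assign_duplicate_groups := by
  intro records m _ _
  unfold Spec_assign_duplicate_groups
  exact pv_main records m
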